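-- pv_equiv track=rewrite | github.com/pypi-data/pypi-mirror-398 | packages/rara-tools/rara_tools-0.9.0-py3-none-any.whl/rara_tools/converters.py | _map_data_field_subfields
-- ===== SOURCE A (Python) =====
-- def _map_data_field_subfields(subfields: list) -> list:
--     """ Maps data field subfields to the standardised format, if necessary.
--
--     Args:
--         subfields (list): List of subfields in format e.g
--           "subfields": [
--                     {
--                         "code": "a",
--                         "data": "foo"
--                     },
--                     {
--                         "code": "c",
--                         "data": "by me."
--                     }
--                 ]
--
--     Returns:
--         list: standardised marc-in-json format. e.g
--          "subfields": [
--                         { "a": "foo /" },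
--                         { "c": "by me." }
--                             ]
--     """
--     result = []
--     for subfield in subfields:
--
--         code = subfield.get("code")
--         data = subfield.get("data")
--
--         if not code or not data:
--             # assume that the subfield is already in the correct format
--             return subfields
--         else:
--             result.append({code: data})
--
--     return result
-- ===== SOURCE B (Python) =====
-- def _map_data_field_subfields(subfields: list) -> list:
--     # Two-pass version: validate first, then build; simpler than A's
--     # interleaved build-while-validating loop with an early return.
--     if all(sf.get("code") and sf.get("data") for sf in subfields):
--         return [{sf["code"]: sf["data"]} for sf in subfields]
--     return subfields
-- ===== Notes on version B (the rewrite author's own statement) =====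
-- stated objective: simpler
-- what changed: A builds the result while validating in one loop and discards partial work with an early return; B does a separate validation pass (all) and, only if it passes, a plain construction comprehension.
import Mathlib
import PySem

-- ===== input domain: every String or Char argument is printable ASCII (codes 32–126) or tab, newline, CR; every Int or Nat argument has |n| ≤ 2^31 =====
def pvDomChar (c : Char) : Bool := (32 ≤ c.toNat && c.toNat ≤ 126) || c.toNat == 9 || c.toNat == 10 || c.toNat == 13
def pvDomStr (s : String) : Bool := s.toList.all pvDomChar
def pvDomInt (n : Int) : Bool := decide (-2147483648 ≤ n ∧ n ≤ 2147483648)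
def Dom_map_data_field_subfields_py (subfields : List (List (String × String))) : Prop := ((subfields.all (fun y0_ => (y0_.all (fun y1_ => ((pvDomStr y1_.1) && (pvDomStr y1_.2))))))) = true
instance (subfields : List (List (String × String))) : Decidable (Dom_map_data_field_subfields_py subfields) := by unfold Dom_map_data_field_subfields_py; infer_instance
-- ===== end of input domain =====

-- B replaces A's single build-while-validating loop (with an early return discarding
-- partial work) by two separate passes: a validation scan, then a construction map.

-- ===== PORT A =====
-- sf.get(k): first match in the association list, none if absent (Python dict.get).
def pvGetSF (sf : List (String × String)) (k : String) : Option String :=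
  (PySem.Dict.mk sf).get? k

-- Python truthiness of an Optional[str]: None and "" are falsy.
def pvTruthy (o : Option String) : Bool := o.getD "" ≠ ""

-- A's loop: 'result' is the accumulator, early return yields the original list.
def aLoop (orig : List (List (String × String))) :
    List (List (String × String)) → List (List (String × String)) → List (List (String × String))
  | [], result => result
  | sf :: rest, result =>
    let code := pvGetSF sf "code"
    let data := pvGetSF sf "data"
    if !pvTruthy code || !pvTruthy data then orig
    else aLoop orig rest (result ++ [[(code.getD "", data.getD "")]])

def map_data_field_subfields_py (subfields : List (List (String × String))) : List (List (String × String)) :=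
  aLoop subfields subfields []

-- ===== PORT B =====
def okSF (sf : List (String × String)) : Bool :=
  pvTruthy (pvGetSF sf "code") && pvTruthy (pvGetSF sf "data")

def mkSF (sf : List (String × String)) : List (String × String) :=
  [((pvGetSF sf "code").getD "", (pvGetSF sf "data").getD "")]

def map_data_field_subfields_py_alt (subfields : List (List (String × String))) : List (List (String × String)) :=
  if subfields.all okSF then subfields.map mkSF else subfields

-- ===== PRECONDITION & SPEC =====
def Spec_map_data_field_subfields_py (subfields : List (List (String × String))) (out : List (List (String × String))) : Prop := out = map_data_field_subfields_py_alt subfields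
instance (subfields : List (List (String × String))) (out : List (List (String × String))) : Decidable (Spec_map_data_field_subfields_py subfields out) := by unfold Spec_map_data_field_subfields_py; infer_instance

-- ===== CLAIM (what is proved, stated in full; the proofs are below) =====
def Claim_equal_map_data_field_subfields_py : Prop := ∀ (subfields : List (List (String × String))), Dom_map_data_field_subfields_py subfields → Spec_map_data_field_subfields_py subfields (map_data_field_subfields_py subfields)

-- ===== LEMMAS AND PROOFS =====
theorem aLoop_eq (orig : List (List (String × String))) :
    ∀ (rest acc : List (List (String × String))),
      aLoop orig rest acc = if rest.all okSF then acc ++ rest.map mkSF else orig := by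
  intro rest
  induction rest with
  | nil => intro acc; simp [aLoop]
  | cons sf rest ih =>
    intro acc
    by_cases h : okSF sf = true
    · have hc : (!pvTruthy (pvGetSF sf "code") || !pvTruthy (pvGetSF sf "data")) = false := by
        simp [okSF] at h; simp [h.1, h.2]
      simp only [aLoop, hc, Bool.false_eq_true, if_false, ih, List.all_cons, h, Bool.true_and,
        List.map_cons, mkSF]
      split <;> simp
    · have hc : (!pvTruthy (pvGetSF sf "code") || !pvTruthy (pvGetSF sf "data")) = true := by
        cases hcode : pvTruthy (pvGetSF sf "code") <;>
          cases hdata : pvTruthy (pvGetSF sf "data") <;> simp_all [okSF]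
      simp [aLoop, hc, List.all_cons, h]

-- ===== VERDICT (by name: the statement is the Claim_ definition above) =====
theorem map_data_field_subfields_py_spec : Claim_equal_map_data_field_subfields_py := by
  intro subfields _
  unfold Spec_map_data_field_subfields_py map_data_field_subfields_py map_data_field_subfields_py_alt
  rw [aLoop_eq]
  split <;> simp
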